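-- pv_equiv track=rewrite | github.com/PBlackberg/phd | functions/myFuncs.py | find_list_source
-- ===== SOURCE A (Python) =====
-- def find_list_source(datasets, models_cmip5, models_cmip6, observations):
--     ''' Determining source of dataset list '''
--     sources = set()
--     for dataset in datasets:
--         sources.add('cmip5') if dataset in models_cmip5 else None
--         sources.add('cmip6') if dataset in models_cmip6 else None
--         sources.add('obs') if dataset in observations else None
--     if   'cmip5' in sources and 'cmip6' in sources:
--          return 'mixed'
--     elif 'cmip5' in sources:
--          return 'cmip5'
--     elif 'cmip6' in sources:
--          return 'cmip6'
--     else: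
--          return 'obs'
-- ===== SOURCE B (Python) =====
-- def find_list_source(datasets, models_cmip5, models_cmip6, observations):
--     ''' Determining source of dataset list '''
--     ds = set(datasets)
--     has5 = bool(ds & set(models_cmip5))
--     has6 = bool(ds & set(models_cmip6))
--     if has5 and has6:
--         return 'mixed'
--     elif has5:
--         return 'cmip5'
--     elif has6:
--         return 'cmip6'
--     else:
--         return 'obs'
-- ===== Notes on version B (the rewrite author's own statement) =====
-- stated objective: faster
-- what changed: Replaces the per-dataset loop that tests membership in three lists and accumulates a label set (including a never-used 'obs' pass) with two boolean flags computed by hashed set intersections, then the same four-way branch.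
import Mathlib
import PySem

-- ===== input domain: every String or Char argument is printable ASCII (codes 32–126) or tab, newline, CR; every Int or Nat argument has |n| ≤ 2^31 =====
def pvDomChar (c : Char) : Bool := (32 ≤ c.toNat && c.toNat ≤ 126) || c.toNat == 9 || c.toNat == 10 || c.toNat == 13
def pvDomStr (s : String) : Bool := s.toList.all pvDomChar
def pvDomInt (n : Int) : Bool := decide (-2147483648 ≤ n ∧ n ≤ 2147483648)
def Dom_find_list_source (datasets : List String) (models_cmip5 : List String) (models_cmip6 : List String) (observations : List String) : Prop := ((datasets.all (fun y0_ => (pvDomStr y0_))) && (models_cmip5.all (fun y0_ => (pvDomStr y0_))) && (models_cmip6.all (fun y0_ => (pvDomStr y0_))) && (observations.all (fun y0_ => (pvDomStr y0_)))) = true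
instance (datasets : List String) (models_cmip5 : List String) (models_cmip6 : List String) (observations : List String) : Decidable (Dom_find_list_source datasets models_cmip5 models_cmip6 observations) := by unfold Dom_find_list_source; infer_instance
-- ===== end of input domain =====

-- B replaces A's per-dataset label-accumulating loop with two boolean flags from set intersections (objective: simpler).

-- ===== PORT A =====
-- A's loop body and loop, as helpers (one step per dataset, in A's statement order)
def pvStepA (models_cmip5 models_cmip6 observations : List String) (s : PySem.Set String) (dataset : String) : PySem.Set String :=
  let s := if models_cmip5.contains dataset then PySem.Set.add s "cmip5" else s
  let s := if models_cmip6.contains dataset then PySem.Set.add s "cmip6" else s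
  if observations.contains dataset then PySem.Set.add s "obs" else s

def pvLoopA (models_cmip5 models_cmip6 observations : List String) (s : PySem.Set String) (datasets : List String) : PySem.Set String :=
  datasets.foldl (pvStepA models_cmip5 models_cmip6 observations) s

def find_list_source (datasets : List String) (models_cmip5 : List String) (models_cmip6 : List String) (observations : List String) : String :=
  let sources : PySem.Set String := pvLoopA models_cmip5 models_cmip6 observations PySem.Set.empty datasets
  if PySem.Set.contains sources "cmip5" && PySem.Set.contains sources "cmip6" then "mixed"
  else if PySem.Set.contains sources "cmip5" then "cmip5"
  else if PySem.Set.contains sources "cmip6" then "cmip6"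
  else "obs"

-- ===== PORT B =====
def find_list_source_alt (datasets : List String) (models_cmip5 : List String) (models_cmip6 : List String) (observations : List String) : String :=
  let ds : PySem.Set String := PySem.Set.ofList datasets
  let has5 : Bool := !(PySem.Set.inter ds (PySem.Set.ofList models_cmip5)).isEmpty
  let has6 : Bool := !(PySem.Set.inter ds (PySem.Set.ofList models_cmip6)).isEmpty
  if has5 && has6 then "mixed"
  else if has5 then "cmip5"
  else if has6 then "cmip6"
  else "obs"

-- ===== PRECONDITION & SPEC =====
def Spec_find_list_source (datasets : List String) (models_cmip5 : List String) (models_cmip6 : List String) (observations : List String) (out : String) : Prop := out = find_list_source_alt datasets models_cmip5 models_cmip6 observations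
instance (datasets : List String) (models_cmip5 : List String) (models_cmip6 : List String) (observations : List String) (out : String) : Decidable (Spec_find_list_source datasets models_cmip5 models_cmip6 observations out) := by unfold Spec_find_list_source; infer_instance

-- ===== CLAIM (what is proved, stated in full; the proofs are below) =====
def Claim_equal_find_list_source : Prop := ∀ (datasets : List String) (models_cmip5 : List String) (models_cmip6 : List String) (observations : List String), Dom_find_list_source datasets models_cmip5 models_cmip6 observations → Spec_find_list_source datasets models_cmip5 models_cmip6 observations (find_list_source datasets models_cmip5 models_cmip6 observations)

-- ===== LEMMAS AND PROOFS =====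

theorem mem_pvStepA (m5 m6 obs : List String) (s : PySem.Set String) (d x : String) :
    x ∈ pvStepA m5 m6 obs s d ↔
      x ∈ s ∨ (x = "cmip5" ∧ d ∈ m5) ∨ (x = "cmip6" ∧ d ∈ m6) ∨ (x = "obs" ∧ d ∈ obs) := by
  unfold pvStepA
  split_ifs with h1 h2 h3 <;> simp_all [PySem.Set.mem_add] <;> tauto

theorem mem_pvLoopA (m5 m6 obs : List String) (s : PySem.Set String) (datasets : List String) (x : String) :
    x ∈ pvLoopA m5 m6 obs s datasets ↔
      x ∈ s ∨ ∃ d ∈ datasets,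
        (x = "cmip5" ∧ d ∈ m5) ∨ (x = "cmip6" ∧ d ∈ m6) ∨ (x = "obs" ∧ d ∈ obs) := by
  induction datasets generalizing s with
  | nil => simp [pvLoopA]
  | cons hd tl ih =>
    simp only [pvLoopA, List.foldl_cons] at *
    rw [ih, mem_pvStepA]
    constructor
    · rintro (( h | h) | ⟨d, hd', hx⟩)
      · exact Or.inl h
      · exact Or.inr ⟨hd, by simp, h⟩
      · exact Or.inr ⟨d, by simp [hd'], hx⟩
    · rintro (h | ⟨d, hd', hx⟩)
      · exact Or.inl (Or.inl h)
      · rcases List.mem_cons.mp hd' with rfl | hmem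
        · exact Or.inl (Or.inr hx)
        · exact Or.inr ⟨d, hmem, hx⟩

theorem containsA (m5 m6 obs : List String) (datasets : List String) :
    PySem.Set.contains (pvLoopA m5 m6 obs PySem.Set.empty datasets) "cmip5"
      = decide (∃ d ∈ datasets, d ∈ m5) ∧
    PySem.Set.contains (pvLoopA m5 m6 obs PySem.Set.empty datasets) "cmip6"
      = decide (∃ d ∈ datasets, d ∈ m6) := by
  constructor <;> · rw [Bool.eq_iff_iff]
                    simp [mem_pvLoopA, PySem.Set.empty]

theorem flagEq (datasets ms : List String) :
    (!(PySem.Set.inter (PySem.Set.ofList datasets) (PySem.Set.ofList ms)).isEmpty)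
      = decide (∃ d ∈ datasets, d ∈ ms) := by
  rw [Bool.eq_iff_iff]
  simp only [Bool.not_eq_eq_eq_not, Bool.not_true, List.isEmpty_eq_false_iff_exists_mem,
    decide_eq_true_eq]
  constructor
  · rintro ⟨x, hx⟩
    rw [PySem.Set.mem_inter, PySem.Set.mem_ofList, PySem.Set.mem_ofList] at hx
    exact ⟨x, hx.1, hx.2⟩
  · rintro ⟨d, hd, hc⟩
    exact ⟨d, by rw [PySem.Set.mem_inter, PySem.Set.mem_ofList, PySem.Set.mem_ofList]; exact ⟨hd, hc⟩⟩

-- ===== VERDICT (by name: the statement is the Claim_ definition above) =====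
theorem find_list_source_spec : Claim_equal_find_list_source := by
  intro datasets m5 m6 obs _
  unfold Spec_find_list_source find_list_source find_list_source_alt
  simp only [(containsA m5 m6 obs datasets).1, (containsA m5 m6 obs datasets).2,
      flagEq datasets m5, flagEq datasets m6]
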